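-- pv_equiv track=rewrite | github.com/eliottcassidy2000/math | 04-computation/gs_ocf_bridge.py | conflict_graph
-- ===== SOURCE A (Python) =====
-- def conflict_graph(cycles, n):
--     """Build conflict graph: edge if cycles share a vertex."""
--     nc = len(cycles)
--     adj = [[False]*nc for _ in range(nc)]
--     for i in range(nc):
--         for j in range(i+1, nc):
--             if set(cycles[i]) & set(cycles[j]):
--                 adj[i][j] = adj[j][i] = True
--     return adj
-- ===== SOURCE B (Python) =====
-- def conflict_graph(cycles, n):
--     """Build conflict graph: edge if cycles share a vertex."""
--     nc = len(cycles)
--     vert2cyc = {}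
--     for i, c in enumerate(cycles):
--         for v in c:
--             lst = vert2cyc.setdefault(v, [])
--             if not lst or lst[-1] != i:
--                 lst.append(i)
--     adj = [[False] * nc for _ in range(nc)]
--     for lst in vert2cyc.values():
--         for a in lst:
--             for b in lst:
--                 if a != b:
--                     adj[a][b] = True
--     return adj
-- ===== Notes on version B (the rewrite author's own statement) =====
-- stated objective: faster
-- what changed: A rebuilds two Python sets and intersects them for every one of the nc^2/2 cycle pairs; B makes one pass building a vertex-to-cycle-indices dictionary and then marks, per shared vertex, the co-occurring index pairs.
import Mathlib
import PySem

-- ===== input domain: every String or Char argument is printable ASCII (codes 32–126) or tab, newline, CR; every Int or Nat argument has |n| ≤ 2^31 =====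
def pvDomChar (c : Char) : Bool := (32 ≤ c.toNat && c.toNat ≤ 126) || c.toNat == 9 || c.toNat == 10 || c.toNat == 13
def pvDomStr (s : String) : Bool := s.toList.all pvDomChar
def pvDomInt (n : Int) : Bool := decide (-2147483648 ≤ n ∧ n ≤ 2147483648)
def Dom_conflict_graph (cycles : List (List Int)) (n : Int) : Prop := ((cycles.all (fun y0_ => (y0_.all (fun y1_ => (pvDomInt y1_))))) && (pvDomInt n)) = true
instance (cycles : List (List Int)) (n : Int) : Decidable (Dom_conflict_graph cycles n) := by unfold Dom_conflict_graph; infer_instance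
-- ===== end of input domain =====

-- B replaces A's all-pairs set intersections by a vertex→cycles index and marks
-- co-occurring cycle pairs per shared vertex (objective: faster).

-- ===== PORT A =====
def conflict_graph (cycles : List (List Int)) (n : Int) : List (List Bool) :=
  let nc : Int := cycles.length
  let adj : List (List Bool) :=
    (PySem.List.pyRange 0 nc 1).map (fun _ => List.replicate nc.toNat false)
  (PySem.List.pyRange 0 nc 1).foldl (fun adj i =>
    (PySem.List.pyRange (i+1) nc 1).foldl (fun adj j =>
      if PySem.Set.inter (PySem.Set.ofList (PySem.List.pyGetD cycles i []))
           (PySem.Set.ofList (PySem.List.pyGetD cycles j [])) ≠ [] then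
        let adj := PySem.List.pySetD adj i
          (PySem.List.pySetD (PySem.List.pyGetD adj i []) j true)
        PySem.List.pySetD adj j
          (PySem.List.pySetD (PySem.List.pyGetD adj j []) i true)
      else adj) adj) adj

-- ===== PORT B =====
def conflict_graph_alt (cycles : List (List Int)) (n : Int) : List (List Bool) :=
  let nc : Int := cycles.length
  let vert2cyc : PySem.Dict Int (List Int) :=
    (PySem.List.enumerate cycles 0).foldl (fun d ic =>
      ic.2.foldl (fun d v =>
        let d := PySem.Dict.setdefault d v []
        let lst := PySem.Dict.getD d v []
        if lst = [] ∨ lst.getLast? ≠ some ic.1 then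
          PySem.Dict.insert d v (lst ++ [ic.1])
        else d) d) PySem.Dict.empty
  let adj : List (List Bool) :=
    (PySem.List.pyRange 0 nc 1).map (fun _ => List.replicate nc.toNat false)
  (PySem.Dict.values vert2cyc).foldl (fun adj lst =>
    lst.foldl (fun adj a =>
      lst.foldl (fun adj b =>
        if a ≠ b then
          PySem.List.pySetD adj a
            (PySem.List.pySetD (PySem.List.pyGetD adj a []) b true)
        else adj) adj) adj) adj

-- ===== PRECONDITION & SPEC =====
def Spec_conflict_graph (cycles : List (List Int)) (n : Int) (out : List (List Bool)) : Prop := out = conflict_graph_alt cycles n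
instance (cycles : List (List Int)) (n : Int) (out : List (List Bool)) : Decidable (Spec_conflict_graph cycles n out) := by unfold Spec_conflict_graph; infer_instance

-- ===== CLAIM (what is proved, stated in full; the proofs are below) =====
def Claim_equal_conflict_graph : Prop := ∀ (cycles : List (List Int)) (n : Int), Dom_conflict_graph cycles n → Spec_conflict_graph cycles n (conflict_graph cycles n)

-- ===== LEMMAS AND PROOFS =====

/-- entry (i,j) of a matrix, Python indexing with default false -/
def mget (m : List (List Bool)) (i j : Int) : Bool :=
  PySem.List.pyGetD (PySem.List.pyGetD m i []) j false

/-- an nc × nc matrix -/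
def Shape (m : List (List Bool)) (nc : Nat) : Prop :=
  m.length = nc ∧ ∀ r ∈ m, r.length = nc

/-- set entry (a,b) to true (the `adj[a][b] = True` pattern of both ports) -/
def setT (m : List (List Bool)) (a b : Int) : List (List Bool) :=
  PySem.List.pySetD m a (PySem.List.pySetD (PySem.List.pyGetD m a []) b true)

/-- "cycles i and j share a vertex" — the relation both programs compute -/
def Shares (cycles : List (List Int)) (i j : Int) : Prop :=
  ∃ v, v ∈ PySem.List.pyGetD cycles i [] ∧ v ∈ PySem.List.pyGetD cycles j []

/-- vertex v occurs in one of the first k cycles -/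
def Cov (cycles : List (List Int)) (k : Int) (v : Int) : Prop :=
  ∃ t ∈ PySem.List.pyRange 0 k 1, v ∈ PySem.List.pyGetD cycles t []

/-- the list of indices t < k whose cycle contains v (what vert2cyc stores) -/
def base (cycles : List (List Int)) (k v : Int) : List Int :=
  (PySem.List.pyRange 0 k 1).filter (fun t => decide (v ∈ PySem.List.pyGetD cycles t []))

lemma pyGetD_pySetD_int {α : Type} (xs : List α) {a i : Int} (ha0 : 0 ≤ a)
    (ha : a < (xs.length : Int)) (hi0 : 0 ≤ i) (v d : α) :
    PySem.List.pyGetD (PySem.List.pySetD xs a v) i d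
      = if i = a then v else PySem.List.pyGetD xs i d := by
  rw [PySem.List.pySetD_of_nonneg _ _ ha0, PySem.List.pyGetD_of_nonneg _ _ hi0,
    PySem.List.pyGetD_of_nonneg _ _ hi0]
  unfold List.getD
  rw [List.getElem?_set]
  by_cases h : i = a
  · subst h
    simp [show i.toNat < xs.length by omega]
  · have : ¬ (a.toNat = i.toNat) := by omega
    simp [this, h]

lemma shape_setT {m : List (List Bool)} {nc : Nat} (h : Shape m nc)
    {a : Int} (b : Int) (ha0 : 0 ≤ a) : Shape (setT m a b) nc := by
  obtain ⟨h1, h2⟩ := h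
  refine ⟨by simp [setT, PySem.List.length_pySetD, h1], ?_⟩
  intro r hr
  rw [setT, PySem.List.pySetD_of_nonneg _ _ ha0] at hr
  rcases Int.lt_or_le a m.length with hlt | hge
  · rcases List.mem_or_eq_of_mem_set hr with h | h
    · exact h2 _ h
    · subst h
      rw [PySem.List.length_pySetD, PySem.List.pyGetD_eq_getElem _ _ ha0 hlt]
      exact h2 _ (List.getElem_mem _)
  · rw [List.set_eq_of_length_le (by omega)] at hr
    exact h2 _ hr

lemma mget_setT {m : List (List Bool)} {nc : Nat} (h : Shape m nc)
    {a b : Int} (ha0 : 0 ≤ a) (ha : a < (nc : Int)) (hb0 : 0 ≤ b) (hb : b < (nc : Int))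
    {i j : Int} (hi0 : 0 ≤ i) (hj0 : 0 ≤ j) :
    mget (setT m a b) i j = (mget m i j || (decide (a = i) && decide (b = j))) := by
  obtain ⟨h1, h2⟩ := h
  have hlen : a < (m.length : Int) := by rw [h1]; exact_mod_cast ha
  have hrow : ((PySem.List.pyGetD m a []).length : Int) = nc := by
    rw [PySem.List.pyGetD_eq_getElem _ _ ha0 hlen]
    exact_mod_cast h2 _ (List.getElem_mem _)
  rw [mget, setT, pyGetD_pySetD_int _ ha0 hlen hi0]
  by_cases hia : i = a
  · subst hia
    rw [if_pos rfl, pyGetD_pySetD_int _ hb0 (by rw [hrow]; exact hb) hj0]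
    by_cases hjb : j = b
    · subst hjb
      simp [mget]
    · have hbj : ¬ b = j := fun h => hjb h.symm
      simp [mget, hjb, hbj]
  · have hai : ¬ a = i := fun h => hia h.symm
    rw [if_neg hia]
    simp [mget, hai]

/-- generic: a fold that only sets entries; entry (i,j) afterwards = before OR some step marked it -/
lemma mget_foldl {σ : Type} {nc : Nat} {i j : Int}
    (f : List (List Bool) → σ → List (List Bool)) (g : σ → Bool) (l : List σ)
    (hf : ∀ m s, s ∈ l → Shape m nc →
      Shape (f m s) nc ∧ mget (f m s) i j = (mget m i j || g s)) :
    ∀ m, Shape m nc →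
      Shape (l.foldl f m) nc ∧ mget (l.foldl f m) i j = (mget m i j || l.any g) := by
  induction l with
  | nil => simp
  | cons s t ih =>
    intro m hm
    obtain ⟨h1, h2⟩ := hf m s (by simp) hm
    obtain ⟨h3, h4⟩ := ih (fun m s hs => hf m s (by simp [hs])) (f m s) h1
    refine ⟨h3, ?_⟩
    simp [h4, h2, Bool.or_assoc]

/-- the initial nc × nc all-False matrix of both ports -/
lemma adj0_props (nc : Nat) :
    Shape ((PySem.List.pyRange 0 (nc : Int) 1).map
      (fun _ => List.replicate ((nc : Int)).toNat false)) nc ∧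
    ∀ i j : Int, 0 ≤ i → 0 ≤ j → mget ((PySem.List.pyRange 0 (nc : Int) 1).map
      (fun _ => List.replicate ((nc : Int)).toNat false)) i j = false := by
  constructor
  · refine ⟨?_, ?_⟩
    · simp [PySem.List.length_pyRange_one]
    · intro r hr
      simp only [List.mem_map] at hr
      obtain ⟨_, _, h⟩ := hr
      simp [← h]
  · intro i j hi0 hj0
    have hmap : ((PySem.List.pyRange 0 (nc : Int) 1).map
        (fun _ => List.replicate ((nc : Int)).toNat false))
        = List.replicate nc (List.replicate nc false) := by simp
    rw [mget, hmap, PySem.List.pyGetD_of_nonneg _ _ hi0]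
    unfold List.getD
    rw [List.getElem?_replicate]
    by_cases h : i.toNat < nc
    · rw [PySem.List.pyGetD_of_nonneg _ _ hj0]
      unfold List.getD
      simp [h, List.getElem?_replicate]
      by_cases h2 : j.toNat < nc <;> simp [h2]
    · simp [h, PySem.List.pyGetD_of_nonneg _ _ hj0]

lemma inter_ne_nil (s t : List Int) :
    PySem.Set.inter (PySem.Set.ofList s) (PySem.Set.ofList t) ≠ [] ↔ ∃ v, v ∈ s ∧ v ∈ t := by
  constructor
  · intro h
    obtain ⟨x, hx⟩ := List.exists_mem_of_ne_nil _ h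
    simp [PySem.Set.inter] at hx
    exact ⟨x, hx⟩
  · rintro ⟨v, hv1, hv2⟩ h
    rw [List.eq_nil_iff_forall_not_mem] at h
    exact h v (by simp [PySem.Set.inter, hv1, hv2])

/-- both loops of A, as an `any` over the marked pairs -/
lemma A_fold (cycles : List (List Int)) (n : Int) {i j : Int} (hi0 : 0 ≤ i) (hj0 : 0 ≤ j) :
    Shape (conflict_graph cycles n) cycles.length ∧
    mget (conflict_graph cycles n) i j =
      (PySem.List.pyRange 0 (cycles.length : Int) 1).any (fun a =>
        (PySem.List.pyRange (a+1) (cycles.length : Int) 1).any (fun b =>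
          decide (PySem.Set.inter (PySem.Set.ofList (PySem.List.pyGetD cycles a []))
              (PySem.Set.ofList (PySem.List.pyGetD cycles b [])) ≠ []) &&
          ((decide (a = i) && decide (b = j)) || (decide (b = i) && decide (a = j))))) := by
  obtain ⟨hs0, hm0⟩ := adj0_props cycles.length
  have h := mget_foldl (nc := cycles.length) (i := i) (j := j)
    (fun adj a =>
      (PySem.List.pyRange (a+1) (cycles.length : Int) 1).foldl (fun adj b =>
        if PySem.Set.inter (PySem.Set.ofList (PySem.List.pyGetD cycles a []))
             (PySem.Set.ofList (PySem.List.pyGetD cycles b [])) ≠ [] then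
          let adj2 := PySem.List.pySetD adj a
            (PySem.List.pySetD (PySem.List.pyGetD adj a []) b true)
          PySem.List.pySetD adj2 b
            (PySem.List.pySetD (PySem.List.pyGetD adj2 b []) a true)
        else adj) adj)
    (fun a =>
      (PySem.List.pyRange (a+1) (cycles.length : Int) 1).any (fun b =>
        decide (PySem.Set.inter (PySem.Set.ofList (PySem.List.pyGetD cycles a []))
            (PySem.Set.ofList (PySem.List.pyGetD cycles b [])) ≠ []) &&
        ((decide (a = i) && decide (b = j)) || (decide (b = i) && decide (a = j)))))
    (PySem.List.pyRange 0 (cycles.length : Int) 1)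
    ?_ _ hs0
  · obtain ⟨hs, hm⟩ := h
    refine ⟨hs, ?_⟩
    rw [show conflict_graph cycles n = (PySem.List.pyRange 0 ((cycles.length : Int)) 1).foldl _
        ((PySem.List.pyRange 0 ((cycles.length : Int)) 1).map
          (fun _ => List.replicate ((cycles.length : Int)).toNat false)) from rfl]
    rw [hm, hm0 i j hi0 hj0, Bool.false_or]
  · intro m a ha hmshape
    rw [PySem.List.mem_pyRange_one] at ha
    exact mget_foldl (nc := cycles.length) (i := i) (j := j) _
      (fun b =>
        decide (PySem.Set.inter (PySem.Set.ofList (PySem.List.pyGetD cycles a []))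
            (PySem.Set.ofList (PySem.List.pyGetD cycles b [])) ≠ []) &&
        ((decide (a = i) && decide (b = j)) || (decide (b = i) && decide (a = j))))
      (PySem.List.pyRange (a+1) (cycles.length : Int) 1)
      (by
        intro m' b hb hm'
        rw [PySem.List.mem_pyRange_one] at hb
        by_cases hc : PySem.Set.inter (PySem.Set.ofList (PySem.List.pyGetD cycles a []))
            (PySem.Set.ofList (PySem.List.pyGetD cycles b [])) ≠ []
        · have hbody : (if PySem.Set.inter (PySem.Set.ofList (PySem.List.pyGetD cycles a []))
                (PySem.Set.ofList (PySem.List.pyGetD cycles b [])) ≠ [] then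
              let adj2 := PySem.List.pySetD m' a
                (PySem.List.pySetD (PySem.List.pyGetD m' a []) b true)
              PySem.List.pySetD adj2 b
                (PySem.List.pySetD (PySem.List.pyGetD adj2 b []) a true)
            else m') = setT (setT m' a b) b a := by
            rw [if_pos hc]; rfl
          rw [hbody]
          have hs1 := shape_setT hm' (a := a) b (by omega)
          refine ⟨shape_setT hs1 (a := b) a (by omega), ?_⟩
          rw [mget_setT hs1 (by omega) (by exact_mod_cast hb.2) (by omega)
              (by exact_mod_cast ha.2) hi0 hj0,
            mget_setT hm' (by omega) (by exact_mod_cast ha.2) (by omega)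
              (by exact_mod_cast hb.2) hi0 hj0]
          simp [hc, Bool.or_assoc]
        · rw [if_neg hc]
          refine ⟨hm', ?_⟩
          simp [hc]) m hmshape

lemma A_shape (cycles : List (List Int)) (n : Int) :
    Shape (conflict_graph cycles n) cycles.length :=
  (A_fold cycles n (i := 0) (j := 0) le_rfl le_rfl).1

/-- characterization of port A's entries -/
lemma A_char (cycles : List (List Int)) (n : Int) {i j : Int}
    (hi0 : 0 ≤ i) (hi : i < (cycles.length : Int)) (hj0 : 0 ≤ j) (hj : j < (cycles.length : Int)) :
    (mget (conflict_graph cycles n) i j = true ↔ i ≠ j ∧ Shares cycles i j) := by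
  rw [(A_fold cycles n hi0 hj0).2]
  simp only [List.any_eq_true, PySem.List.mem_pyRange_one, Bool.and_eq_true, Bool.or_eq_true,
    decide_eq_true_eq]
  constructor
  · rintro ⟨a, ⟨ha0, ha⟩, b, ⟨hab, hb⟩, hc, hd⟩
    rw [inter_ne_nil] at hc
    rcases hd with ⟨hai, hbj⟩ | ⟨hbi, haj⟩
    · subst hai; subst hbj
      exact ⟨by omega, hc⟩
    · subst hbi; subst haj
      obtain ⟨v, hv1, hv2⟩ := hc
      exact ⟨by omega, v, hv2, hv1⟩
  · rintro ⟨hij, v, hv1, hv2⟩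
    rcases Int.lt_or_lt_of_ne hij with hlt | hlt
    · exact ⟨i, ⟨hi0, hi⟩, j, ⟨by omega, hj⟩, by rw [inter_ne_nil]; exact ⟨v, hv1, hv2⟩,
        Or.inl ⟨rfl, rfl⟩⟩
    · exact ⟨j, ⟨hj0, hj⟩, i, ⟨by omega, hi⟩, by rw [inter_ne_nil]; exact ⟨v, hv2, hv1⟩,
        Or.inr ⟨rfl, rfl⟩⟩

/-- the body of B's dict-building inner loop, named for the proofs -/
def dstep (k : Int) (d : PySem.Dict Int (List Int)) (v : Int) : PySem.Dict Int (List Int) :=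
  let d := PySem.Dict.setdefault d v []
  let lst := PySem.Dict.getD d v []
  if lst = [] ∨ lst.getLast? ≠ some k then PySem.Dict.insert d v (lst ++ [k])
  else d

lemma mem_base (cycles : List (List Int)) (k v t : Int) :
    t ∈ base cycles k v ↔ (0 ≤ t ∧ t < k ∧ v ∈ PySem.List.pyGetD cycles t []) := by
  simp [base, List.mem_filter, PySem.List.mem_pyRange_one, and_assoc]

lemma cov_iff_base (cycles : List (List Int)) (k v : Int) :
    Cov cycles k v ↔ base cycles k v ≠ [] := by
  rw [Ne, List.eq_nil_iff_forall_not_mem]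
  push_neg
  constructor
  · rintro ⟨t, ht, hm⟩
    rw [PySem.List.mem_pyRange_one] at ht
    exact ⟨t, (mem_base cycles k v t).mpr ⟨ht.1, ht.2, hm⟩⟩
  · rintro ⟨t, ht⟩
    rw [mem_base] at ht
    exact ⟨t, PySem.List.mem_pyRange_one.mpr ⟨ht.1, ht.2.1⟩, ht.2.2⟩

lemma getLast?_base_ne (cycles : List (List Int)) (k v : Int) :
    (base cycles k v).getLast? ≠ some k := by
  intro h
  have := List.mem_of_getLast? h
  rw [mem_base] at this
  omega

/-- one step of B's dict-building inner loop preserves the index invariant -/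
lemma dstep_inv (cycles : List (List Int)) {k : Int} (hk0 : 0 ≤ k)
    (done : List Int) (v0 : Int) (d : PySem.Dict Int (List Int))
    (hnd : d.keys.Nodup)
    (hkeys : ∀ v, v ∈ d.keys ↔ (Cov cycles k v ∨ v ∈ done))
    (hval : ∀ v, v ∈ d.keys → d.getD v [] = base cycles k v ++ (if v ∈ done then [k] else [])) :
    (dstep k d v0).keys.Nodup ∧
    (∀ v, v ∈ (dstep k d v0).keys ↔ (Cov cycles k v ∨ v ∈ done ++ [v0])) ∧
    (∀ v, v ∈ (dstep k d v0).keys →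
      (dstep k d v0).getD v [] = base cycles k v ++ (if v ∈ done ++ [v0] then [k] else [])) := by
  by_cases hvk : v0 ∈ d.keys
  · have hc : d.contains v0 = true := (PySem.Dict.contains_iff_mem_keys d v0).mpr hvk
    have hsd : PySem.Dict.setdefault d v0 ([] : List Int) = d :=
      PySem.Dict.setdefault_of_contains d _ hc
    have hlst : d.getD v0 [] = base cycles k v0 ++ (if v0 ∈ done then [k] else []) := hval v0 hvk
    by_cases hdone : v0 ∈ done
    · -- already recorded for this cycle: the guard is false, the dict is unchanged
      have hval0 : d.getD v0 [] = base cycles k v0 ++ [k] := by rw [hlst, if_pos hdone]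
      have hguard : ¬ (d.getD v0 [] = [] ∨ (d.getD v0 []).getLast? ≠ some k) := by
        rw [hval0]
        push_neg
        exact ⟨by simp, by simp⟩
      have hd' : dstep k d v0 = d := by
        rw [dstep, hsd]
        simp only [hguard, ite_false]
      rw [hd']
      refine ⟨hnd, ?_, ?_⟩
      · intro v
        rw [hkeys v, List.mem_append, List.mem_singleton]
        constructor
        · rintro (h | h)
          · exact Or.inl h
          · exact Or.inr (Or.inl h)
        · rintro (h | h | h)
          · exact Or.inl h
          · exact Or.inr h
          · subst h; exact (hkeys v).mp hvk
      · intro v hv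
        rw [hval v hv]
        by_cases hvd : v ∈ done
        · simp [hvd]
        · by_cases hvv : v = v0
          · subst hvv; exact absurd hdone hvd
          · simp [hvd, hvv]
    · -- seen in an earlier cycle but not in this one yet: append k
      have hval0 : d.getD v0 [] = base cycles k v0 := by
        rw [hlst, if_neg hdone, List.append_nil]
      have hguard : d.getD v0 [] = [] ∨ (d.getD v0 []).getLast? ≠ some k := by
        rw [hval0]; exact Or.inr (getLast?_base_ne cycles k v0)
      have hd' : dstep k d v0 = d.insert v0 (base cycles k v0 ++ [k]) := by
        rw [dstep, hsd, if_pos hguard, hval0]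
      rw [hd']
      refine ⟨PySem.Dict.nodup_keys_insert _ _ _ hnd, ?_, ?_⟩
      · intro v
        rw [PySem.Dict.mem_keys_insert, hkeys v, List.mem_append, List.mem_singleton]
        constructor
        · rintro (h | h | h)
          · subst h; exact Or.inr (Or.inr rfl)
          · exact Or.inl h
          · exact Or.inr (Or.inl h)
        · rintro (h | h | h)
          · exact Or.inr (Or.inl h)
          · exact Or.inr (Or.inr h)
          · exact Or.inl h
      · intro v hv
        rw [PySem.Dict.getD_insert]
        by_cases hvv : v = v0
        · subst hvv
          simp [hdone]
        · rw [if_neg hvv]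
          rw [PySem.Dict.mem_keys_insert] at hv
          have hv' : v ∈ d.keys := by tauto
          rw [hval v hv']
          by_cases hvd : v ∈ done <;> simp [hvd, hvv]
  · -- fresh vertex: key v0 is created with value [k]
    have hc : d.contains v0 = false := by
      rcases h : d.contains v0 with _ | _
      · rfl
      · exact absurd ((PySem.Dict.contains_iff_mem_keys d v0).mp h) hvk
    have hncov : ¬ Cov cycles k v0 := fun h => hvk ((hkeys v0).mpr (Or.inl h))
    have hbase0 : base cycles k v0 = [] := by
      by_contra hne
      exact hncov ((cov_iff_base cycles k v0).mpr hne)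
    have hsd : PySem.Dict.setdefault d v0 ([] : List Int) = d.insert v0 [] :=
      PySem.Dict.setdefault_of_not_contains d _ hc
    have hlst : (d.insert v0 ([] : List Int)).getD v0 [] = [] := by
      rw [PySem.Dict.getD_insert, if_pos rfl]
    have hd' : dstep k d v0 = d.insert v0 [k] := by
      rw [dstep, hsd]
      simp only [hlst]
      rw [if_pos (by simp)]
      rw [PySem.Dict.insert_insert_self]
      rfl
    rw [hd']
    refine ⟨PySem.Dict.nodup_keys_insert _ _ _ hnd, ?_, ?_⟩
    · intro v
      rw [PySem.Dict.mem_keys_insert, hkeys v, List.mem_append, List.mem_singleton]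
      tauto
    · intro v hv
      rw [PySem.Dict.getD_insert]
      by_cases hvv : v = v0
      · subst hvv
        simp [hbase0]
      · rw [if_neg hvv]
        rw [PySem.Dict.mem_keys_insert] at hv
        have hv' : v ∈ d.keys := by tauto
        rw [hval v hv']
        by_cases hvd : v ∈ done <;> simp [hvd, hvv]

lemma cov_succ (cycles : List (List Int)) {k : Int} (hk0 : 0 ≤ k) (v : Int) :
    Cov cycles (k+1) v ↔ (Cov cycles k v ∨ v ∈ PySem.List.pyGetD cycles k []) := by
  unfold Cov
  rw [PySem.List.pyRange_one_succ_right hk0]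
  simp only [List.mem_append, List.mem_singleton]
  constructor
  · rintro ⟨t, (ht | ht), hm⟩
    · exact Or.inl ⟨t, ht, hm⟩
    · subst ht; exact Or.inr hm
  · rintro (⟨t, ht, hm⟩ | hm)
    · exact ⟨t, Or.inl ht, hm⟩
    · exact ⟨k, Or.inr rfl, hm⟩

lemma base_succ (cycles : List (List Int)) {k : Int} (hk0 : 0 ≤ k) (v : Int) :
    base cycles (k+1) v
      = base cycles k v ++ (if v ∈ PySem.List.pyGetD cycles k [] then [k] else []) := by
  unfold base
  rw [PySem.List.pyRange_one_succ_right hk0, List.filter_append]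
  congr 1
  by_cases h : v ∈ PySem.List.pyGetD cycles k [] <;> simp [h]

/-- the inner loop of B's dict-building phase preserves the index invariant -/
lemma inner_inv (cycles : List (List Int)) (k : Int) (hk0 : 0 ≤ k) :
    ∀ (rest done : List Int) (d : PySem.Dict Int (List Int)),
    d.keys.Nodup →
    (∀ v, v ∈ d.keys ↔ (Cov cycles k v ∨ v ∈ done)) →
    (∀ v, v ∈ d.keys → d.getD v [] = base cycles k v ++ (if v ∈ done then [k] else [])) →
    ((rest.foldl (dstep k) d).keys.Nodup ∧
     (∀ v, v ∈ (rest.foldl (dstep k) d).keys ↔ (Cov cycles k v ∨ v ∈ done ++ rest)) ∧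
     (∀ v, v ∈ (rest.foldl (dstep k) d).keys →
        (rest.foldl (dstep k) d).getD v []
          = base cycles k v ++ (if v ∈ done ++ rest then [k] else []))) := by
  intro rest
  induction rest with
  | nil =>
    intro done d hnd hkeys hval
    simpa using ⟨hnd, hkeys, hval⟩
  | cons v0 rest ih =>
    intro done d hnd hkeys hval
    obtain ⟨h1, h2, h3⟩ := dstep_inv cycles hk0 done v0 d hnd hkeys hval
    have hres := ih (done ++ [v0]) (dstep k d v0) h1 h2 h3
    simpa [List.append_assoc] using hres

/-- B's finished dict: keys are exactly the covered vertices, values are the index lists -/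
lemma dict_inv (cycles : List (List Int)) (K : Nat) :
    ((PySem.List.pyRange 0 (K : Int) 1).foldl (fun d t =>
        (PySem.List.pyGetD cycles t []).foldl (dstep t) d) PySem.Dict.empty).keys.Nodup ∧
    (∀ v, v ∈ ((PySem.List.pyRange 0 (K : Int) 1).foldl (fun d t =>
        (PySem.List.pyGetD cycles t []).foldl (dstep t) d) PySem.Dict.empty).keys
      ↔ Cov cycles (K : Int) v) ∧
    (∀ v, v ∈ ((PySem.List.pyRange 0 (K : Int) 1).foldl (fun d t =>
        (PySem.List.pyGetD cycles t []).foldl (dstep t) d) PySem.Dict.empty).keys →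
      ((PySem.List.pyRange 0 (K : Int) 1).foldl (fun d t =>
        (PySem.List.pyGetD cycles t []).foldl (dstep t) d) PySem.Dict.empty).getD v []
        = base cycles (K : Int) v) := by
  induction K with
  | zero =>
    rw [show ((0 : Nat) : Int) = 0 from rfl, PySem.List.pyRange_one_eq_nil le_rfl]
    refine ⟨by simp [PySem.Dict.keys_empty], ?_, ?_⟩
    · intro v
      simp [PySem.Dict.keys_empty, Cov, PySem.List.pyRange_one_eq_nil]
    · intro v hv
      simp [PySem.Dict.keys_empty] at hv
  | succ K ih =>
    obtain ⟨h1, h2, h3⟩ := ih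
    have hcast : ((K + 1 : Nat) : Int) = (K : Int) + 1 := by push_cast; ring
    rw [hcast, PySem.List.pyRange_one_succ_right (by positivity), List.foldl_append]
    simp only [List.foldl_cons, List.foldl_nil]
    obtain ⟨g1, g2, g3⟩ := inner_inv cycles (K : Int) (by positivity)
      (PySem.List.pyGetD cycles (K : Int) []) []
      ((PySem.List.pyRange 0 (K : Int) 1).foldl (fun d t =>
        (PySem.List.pyGetD cycles t []).foldl (dstep t) d) PySem.Dict.empty)
      h1 (by intro v; rw [h2 v]; simp) (by intro v hv; rw [h3 v hv]; simp)
    refine ⟨g1, ?_, ?_⟩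
    · intro v
      rw [g2 v, cov_succ cycles (by positivity) v]
      simp
    · intro v hv
      rw [g3 v hv, base_succ cycles (by positivity) v]
      simp

/-- B's marking phase, as an `any` over keys of the vertex index -/
lemma B_fold (cycles : List (List Int)) (n : Int) {i j : Int} (hi0 : 0 ≤ i) (hj0 : 0 ≤ j) :
    Shape (conflict_graph_alt cycles n) cycles.length ∧
    mget (conflict_graph_alt cycles n) i j =
      ((PySem.List.pyRange 0 (cycles.length : Int) 1).foldl (fun d t =>
          (PySem.List.pyGetD cycles t []).foldl (dstep t) d) PySem.Dict.empty).keys.any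
        (fun v => (base cycles (cycles.length : Int) v).any (fun a =>
          (base cycles (cycles.length : Int) v).any (fun b =>
            decide (a ≠ b) && (decide (a = i) && decide (b = j))))) := by
  obtain ⟨h1, h2, h3⟩ := dict_inv cycles cycles.length
  obtain ⟨hs0, hm0⟩ := adj0_props cycles.length
  have henum : conflict_graph_alt cycles n =
      (PySem.Dict.values ((PySem.List.pyRange 0 (cycles.length : Int) 1).foldl (fun d t =>
          (PySem.List.pyGetD cycles t []).foldl (dstep t) d) PySem.Dict.empty)).foldl
        (fun adj lst =>
          lst.foldl (fun adj a =>
            lst.foldl (fun adj b =>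
              if a ≠ b then
                PySem.List.pySetD adj a
                  (PySem.List.pySetD (PySem.List.pyGetD adj a []) b true)
              else adj) adj) adj)
        ((PySem.List.pyRange 0 (cycles.length : Int) 1).map
          (fun _ => List.replicate ((cycles.length : Int)).toNat false)) := by
    simp only [conflict_graph_alt]
    rw [PySem.List.enumerate_eq_map_pyRange cycles ([] : List Int), List.foldl_map]
    rfl
  rw [henum, PySem.Dict.values_eq_map_keys _ h1 ([] : List Int), List.foldl_map]
  have h := mget_foldl (nc := cycles.length) (i := i) (j := j)
    (fun adj v =>
      ((((PySem.List.pyRange 0 (cycles.length : Int) 1).foldl (fun d t =>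
          (PySem.List.pyGetD cycles t []).foldl (dstep t) d) PySem.Dict.empty).getD v
            ([] : List Int))).foldl
        (fun adj a =>
          ((((PySem.List.pyRange 0 (cycles.length : Int) 1).foldl (fun d t =>
              (PySem.List.pyGetD cycles t []).foldl (dstep t) d) PySem.Dict.empty).getD v
                ([] : List Int))).foldl
            (fun adj b =>
              if a ≠ b then
                PySem.List.pySetD adj a
                  (PySem.List.pySetD (PySem.List.pyGetD adj a []) b true)
              else adj) adj) adj)
    (fun v => (base cycles (cycles.length : Int) v).any (fun a =>
      (base cycles (cycles.length : Int) v).any (fun b =>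
        decide (a ≠ b) && (decide (a = i) && decide (b = j)))))
    ((PySem.List.pyRange 0 (cycles.length : Int) 1).foldl (fun d t =>
        (PySem.List.pyGetD cycles t []).foldl (dstep t) d) PySem.Dict.empty).keys
    ?_ _ hs0
  · obtain ⟨hs, hm⟩ := h
    exact ⟨hs, hm.trans (by rw [hm0 i j hi0 hj0, Bool.false_or])⟩
  · intro m v hv hmshape
    simp only [h3 v hv]
    exact mget_foldl (nc := cycles.length) (i := i) (j := j) _
      (fun a => (base cycles (cycles.length : Int) v).any (fun b =>
        decide (a ≠ b) && (decide (a = i) && decide (b = j))))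
      (base cycles (cycles.length : Int) v)
      (by
        intro m' a ha hm'
        rw [mem_base] at ha
        exact mget_foldl (nc := cycles.length) (i := i) (j := j) _
          (fun b => decide (a ≠ b) && (decide (a = i) && decide (b = j)))
          (base cycles (cycles.length : Int) v)
          (by
            intro m'' b hb hm''
            rw [mem_base] at hb
            by_cases hab : a ≠ b
            · have hbody : (if a ≠ b then
                  PySem.List.pySetD m'' a
                    (PySem.List.pySetD (PySem.List.pyGetD m'' a []) b true)
                else m'') = setT m'' a b := by rw [if_pos hab]; rfl
              rw [hbody]
              refine ⟨shape_setT hm'' (a := a) b (by omega), ?_⟩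
              rw [mget_setT hm'' (by omega) (by exact_mod_cast ha.2.1) (by omega)
                  (by exact_mod_cast hb.2.1) hi0 hj0]
              simp [hab]
            · rw [if_neg hab]
              exact ⟨hm'', by simp [hab]⟩) m' hm') m hmshape

lemma B_shape (cycles : List (List Int)) (n : Int) :
    Shape (conflict_graph_alt cycles n) cycles.length :=
  (B_fold cycles n (i := 0) (j := 0) le_rfl le_rfl).1

/-- characterization of port B's entries -/
lemma B_char (cycles : List (List Int)) (n : Int) {i j : Int}
    (hi0 : 0 ≤ i) (hi : i < (cycles.length : Int)) (hj0 : 0 ≤ j) (hj : j < (cycles.length : Int)) :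
    (mget (conflict_graph_alt cycles n) i j = true ↔ i ≠ j ∧ Shares cycles i j) := by
  obtain ⟨h1, h2, h3⟩ := dict_inv cycles cycles.length
  rw [(B_fold cycles n hi0 hj0).2]
  simp only [List.any_eq_true, Bool.and_eq_true, decide_eq_true_eq]
  constructor
  · rintro ⟨v, hv, a, ha, b, hb, hab, hai, hbj⟩
    subst hai; subst hbj
    rw [mem_base] at ha hb
    exact ⟨hab, v, ha.2.2, hb.2.2⟩
  · rintro ⟨hij, v, hv1, hv2⟩
    refine ⟨v, (h2 v).mpr ⟨i, PySem.List.mem_pyRange_one.mpr ⟨hi0, hi⟩, hv1⟩,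
      i, (mem_base _ _ _ _).mpr ⟨hi0, hi, hv1⟩,
      j, (mem_base _ _ _ _).mpr ⟨hj0, hj, hv2⟩, hij, rfl, rfl⟩

/-- two same-shape matrices with equal entries are equal -/
lemma eq_of_shape_mget {m1 m2 : List (List Bool)} {nc : Nat}
    (h1 : Shape m1 nc) (h2 : Shape m2 nc)
    (h : ∀ i j : Nat, i < nc → j < nc → mget m1 (i : Int) (j : Int) = mget m2 (i : Int) (j : Int)) :
    m1 = m2 := by
  obtain ⟨l1, r1⟩ := h1
  obtain ⟨l2, r2⟩ := h2
  have hmg : ∀ (m : List (List Bool)), m.length = nc → (∀ r ∈ m, r.length = nc) →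
      ∀ i j : Nat, i < nc → j < nc → mget m (i : Int) (j : Int) = m[i]!.getD j false := by
    intro m lm rm i j hi hj
    have him : i < m.length := by omega
    rw [mget, PySem.List.pyGetD_natCast, PySem.List.pyGetD_natCast]
    rw [List.getD_eq_getElem _ _ him, List.getElem!_eq_getElem?_getD, List.getElem?_eq_getElem him]
    rfl
  apply List.ext_getElem (by omega)
  intro i hi1 hi2
  have hrl1 : m1[i].length = nc := r1 _ (List.getElem_mem _)
  have hrl2 : m2[i].length = nc := r2 _ (List.getElem_mem _)
  apply List.ext_getElem (by omega)
  intro j hj1 hj2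
  have := (hmg m1 l1 r1 i j (by omega) (by omega)).symm.trans
    ((h i j (by omega) (by omega)).trans (hmg m2 l2 r2 i j (by omega) (by omega)))
  rw [List.getElem!_eq_getElem?_getD, List.getElem?_eq_getElem (by omega : i < m1.length),
    List.getElem!_eq_getElem?_getD, List.getElem?_eq_getElem (by omega : i < m2.length)] at this
  simp only [Option.getD_some] at this
  rw [List.getD_eq_getElem _ _ (by omega : j < m1[i].length),
    List.getD_eq_getElem _ _ (by omega : j < m2[i].length)] at this
  exact this

-- ===== VERDICT (by name: the statement is the Claim_ definition above) =====
theorem conflict_graph_spec : Claim_equal_conflict_graph := by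
  intro cycles n _
  unfold Spec_conflict_graph
  refine eq_of_shape_mget (A_shape cycles n) (B_shape cycles n) ?_
  intro i j hi hj
  have hi' : ((i : Int)) < (cycles.length : Int) := by exact_mod_cast hi
  have hj' : ((j : Int)) < (cycles.length : Int) := by exact_mod_cast hj
  have hA2 := A_char cycles n (i := (i : Int)) (j := (j : Int)) (by positivity) hi' (by positivity) hj'
  have hB2 := B_char cycles n (i := (i : Int)) (j := (j : Int)) (by positivity) hi' (by positivity) hj'
  have hiff := hA2.trans hB2.symm
  cases hAe : mget (conflict_graph cycles n) (i : Int) (j : Int) <;>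
    cases hBe : mget (conflict_graph_alt cycles n) (i : Int) (j : Int)
  · rfl
  · exact absurd (hiff.mpr hBe) (by simp [hAe])
  · exact absurd (hiff.mp hAe) (by simp [hBe])
  · rfl
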